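-- pv_equiv track=rewrite | github.com/VuBui217/dailycodingchallenge | 2025/november/longest_word.py | optimized_longest_word
-- ===== SOURCE A (Python) =====
-- def optimized_longest_word(sentence):
--     max_len = 0
--     output = ""
--     curr_len = 0
--     curr_word = ""
--
--     i = 0
--
--     for ch in sentence + " ":
--         if ch.isalpha():
--             curr_len += 1
--             curr_word += ch
--         elif ch == " ":
--             if curr_len > max_len:
--                 max_len = curr_len
--                 output = curr_word
--             curr_len = 0
--             curr_word = ""
--         else:
--             continue
--     return output
-- ===== SOURCE B (Python) =====
-- def optimized_longest_word(sentence):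
--     best = ""
--     for token in sentence.split(" "):
--         filtered = "".join(c for c in token if c.isalpha())
--         if len(filtered) > len(best):
--             best = filtered
--     return best
-- ===== Notes on version B (the rewrite author's own statement) =====
-- stated objective: simpler
-- what changed: Replaces A's single char-by-char state machine (four running state variables over sentence+' ') with a two-level pass: split on the literal space, filter each token to its alphabetic characters, and keep the first strictly-longest filtered token.
import Mathlib
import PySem

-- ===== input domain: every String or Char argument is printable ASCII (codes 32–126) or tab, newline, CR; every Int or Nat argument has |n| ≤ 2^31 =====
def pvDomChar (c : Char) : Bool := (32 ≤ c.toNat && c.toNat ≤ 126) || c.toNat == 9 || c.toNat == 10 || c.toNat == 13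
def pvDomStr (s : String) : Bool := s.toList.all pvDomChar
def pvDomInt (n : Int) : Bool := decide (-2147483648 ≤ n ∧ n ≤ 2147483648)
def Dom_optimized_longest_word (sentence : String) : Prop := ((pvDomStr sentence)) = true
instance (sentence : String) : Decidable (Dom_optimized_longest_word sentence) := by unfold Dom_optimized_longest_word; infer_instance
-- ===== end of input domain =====

-- B replaces A's single char-by-char state machine with a split-on-space / filter-per-token / pick-first-longest pass (objective: simpler).

-- ===== PORT A =====
-- state = (max_len, output, curr_len, curr_word); strings handled as char lists, String.ofList at the end
def alw_step (st : Int × List Char × Int × List Char) (ch : Char) : Int × List Char × Int × List Char :=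
  let (maxLen, output, currLen, currWord) := st
  if PySem.Chars.isalpha ch then (maxLen, output, currLen + 1, currWord ++ [ch])
  else if ch == ' ' then
    if currLen > maxLen then (currLen, currWord, 0, []) else (maxLen, output, 0, [])
  else st  -- 'continue': state unchanged

def optimized_longest_word (sentence : String) : String :=
  String.ofList (((sentence.toList ++ [' ']).foldl alw_step (0, [], 0, [])).2.1)

-- ===== PORT B =====
-- "".join(c for c in token if c.isalpha())
def alw_filt (t : List Char) : List Char := t.filter (fun c => PySem.Chars.isalpha c)

-- sentence.split(" ") with literal single-space separator = List.splitOn ' ' on the char list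
def optimized_longest_word_alt (sentence : String) : String :=
  String.ofList ((sentence.toList.splitOn ' ').foldl
    (fun best token =>
      let filtered := alw_filt token
      if filtered.length > best.length then filtered else best) [])

-- ===== PRECONDITION & SPEC =====
def Spec_optimized_longest_word (sentence : String) (out : String) : Prop := out = optimized_longest_word_alt sentence
instance (sentence : String) (out : String) : Decidable (Spec_optimized_longest_word sentence out) := by unfold Spec_optimized_longest_word; infer_instance

-- ===== CLAIM (what is proved, stated in full; the proofs are below) =====
def Claim_equal_optimized_longest_word : Prop := ∀ (sentence : String), Dom_optimized_longest_word sentence → Spec_optimized_longest_word sentence (optimized_longest_word sentence)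

-- ===== LEMMAS AND PROOFS =====

-- B's per-token step
def alw_bstep (best token : List Char) : List Char :=
  if (alw_filt token).length > best.length then alw_filt token else best

-- A's fold, when the pending word w continues into the first token of the split,
-- behaves like B's fold started at `out` with w prepended to the first token's filtered form.
def alw_bcont (out w : List Char) (toks : List (List Char)) : List Char :=
  match toks with
  | [] => out
  | t :: ts => ts.foldl alw_bstep
      (if (w ++ alw_filt t).length > out.length then w ++ alw_filt t else out)

theorem alw_key (cs : List Char) : ∀ (out w : List Char),
    ((cs ++ [' ']).foldl alw_step ((out.length : Int), out, (w.length : Int), w)).2.1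
      = alw_bcont out w (cs.splitOn ' ') := by
  induction cs with
  | nil =>
    intro out w
    simp only [List.nil_append, List.foldl_cons, List.foldl_nil, alw_step, List.splitOn_nil,
      alw_bcont, List.foldl_nil, List.append_nil, alw_filt, List.filter_nil,
      show PySem.Chars.isalpha ' ' = false from by decide,
      Bool.false_eq_true, if_false, beq_self_eq_true, if_true]
    by_cases h : w.length > out.length
    · rw [if_pos (by exact_mod_cast h), if_pos h]
    · rw [if_neg (by exact_mod_cast h), if_neg h]
  | cons c cs ih =>
    intro out w
    show ((cs ++ [' ']).foldl alw_step
        (alw_step ((out.length : Int), out, (w.length : Int), w) c)).2.1 = _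
    rw [show (c :: cs).splitOn ' ' = List.splitOnP (· == ' ') (c :: cs) from rfl,
        List.splitOnP_cons]
    obtain ⟨t, ts, hts⟩ := List.exists_cons_of_ne_nil (List.splitOnP_ne_nil (· == ' ') cs)
    by_cases hsp : c = ' '
    · subst hsp
      simp only [beq_self_eq_true, if_true]
      have hstep : alw_step ((out.length : Int), out, (w.length : Int), w) ' '
          = (((if w.length > out.length then w else out).length : Int),
              (if w.length > out.length then w else out), (0 : Int), []) := by
        simp only [alw_step, show PySem.Chars.isalpha ' ' = false from by decide,
          Bool.false_eq_true, if_false, beq_self_eq_true, if_true]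
        by_cases h : w.length > out.length
        · rw [if_pos (by exact_mod_cast h), if_pos h]
        · rw [if_neg (by exact_mod_cast h), if_neg h]
      have ihb := ih (if w.length > out.length then w else out) []
      simp only [List.length_nil, Nat.cast_zero] at ihb
      rw [hstep, ihb, show List.splitOn ' ' cs = List.splitOnP (· == ' ') cs from rfl, hts]
      simp [alw_bcont, alw_bstep, alw_filt]
    · have hc : (c == ' ') = false := by simp [hsp]
      rw [hc]
      simp only [Bool.false_eq_true, if_false]
      by_cases ha : PySem.Chars.isalpha c = true
      · have hstep : alw_step ((out.length : Int), out, (w.length : Int), w) c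
            = ((out.length : Int), out, ((w ++ [c]).length : Int), w ++ [c]) := by
          simp [alw_step, ha]
        rw [hstep, ih out (w ++ [c]),
          show List.splitOn ' ' cs = List.splitOnP (· == ' ') cs from rfl, hts]
        simp [alw_bcont, alw_filt, ha]
      · have hstep : alw_step ((out.length : Int), out, (w.length : Int), w) c
            = ((out.length : Int), out, (w.length : Int), w) := by
          simp [alw_step, ha, hc]
        rw [hstep, ih out w,
          show List.splitOn ' ' cs = List.splitOnP (· == ' ') cs from rfl, hts]
        simp [alw_bcont, alw_filt, ha]

theorem alw_bcont_nil_start (toks : List (List Char)) (htoks : toks ≠ []) :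
    alw_bcont [] [] toks = toks.foldl alw_bstep [] := by
  obtain ⟨t, ts, rfl⟩ := List.exists_cons_of_ne_nil htoks
  simp [alw_bcont, alw_bstep, List.foldl_cons]

-- ===== VERDICT (by name: the statement is the Claim_ definition above) =====
theorem optimized_longest_word_spec : Claim_equal_optimized_longest_word := by
  intro sentence _
  show optimized_longest_word sentence = optimized_longest_word_alt sentence
  unfold optimized_longest_word optimized_longest_word_alt
  have h := alw_key sentence.toList [] []
  simp only [List.length_nil, Nat.cast_zero] at h
  rw [h, alw_bcont_nil_start _ (by
    rw [show sentence.toList.splitOn ' ' = List.splitOnP (· == ' ') sentence.toList from rfl]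
    exact List.splitOnP_ne_nil _ _)]
  rfl
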